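-- pv_equiv track=rewrite | github.com/rninji/algorithm | Programmers/P389479_서버증설횟수.py | solution
-- ===== SOURCE A (Python) =====
-- def solution(players, m, k):
--     answer = 0
--     server = [25]
--     for i in range(len(players)):
--         # 서버 체크
--         for j in range(len(server)-1, -1, -1):
--             if server[j] == i:
--                 server.pop(j)
--
--         # 이용자 수 확인 후 증설
--         nowplay = players[i]
--         if nowplay < len(server) * m:
--             continue
--         new = nowplay//m + 1 - len(server)
--         answer += new
--         for _ in range(new):
--             server.append(i+k)
--     return answer
-- ===== SOURCE B (Python) =====
-- def solution(players, m, k):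
--     # Difference/ledger reformulation: instead of a multiset of servers with
--     # expiry timestamps, record how many servers were added at each hour.
--     # A server added at hour j serves hours j..j+k-1, so entering hour i the
--     # addition made at hour i-k (if any) stops serving: one O(1) subtraction
--     # replaces A's rescan of the whole server list.  The initial server is
--     # handled arithmetically (it serves hours 0..24).
--     adds = []            # adds[j] = servers added at hour j
--     alive = 0            # previously added servers still serving this hour
--     answer = 0
--     for i, p in enumerate(players):
--         if k > 0 and i >= k:
--             alive -= adds[i - k]
--         cnt = alive + (1 if i < 25 else 0)
--         added = 0
--         if p >= cnt * m:
--             new = p // m + 1 - cnt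
--             answer += new
--             added = max(new, 0)
--         adds.append(added)
--         alive += added
--     return answer
-- ===== Notes on version B (the rewrite author's own statement) =====
-- stated objective: faster
-- what changed: B replaces A's multiset of per-server expiry timestamps (rescanned and popped element by element every hour) with a per-hour additions ledger: it records how many servers were added each hour and updates a running live count by one O(1) subtraction (the addition from k hours ago expires), handling the initial server arithmetically (i < 25).
import Mathlib
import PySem

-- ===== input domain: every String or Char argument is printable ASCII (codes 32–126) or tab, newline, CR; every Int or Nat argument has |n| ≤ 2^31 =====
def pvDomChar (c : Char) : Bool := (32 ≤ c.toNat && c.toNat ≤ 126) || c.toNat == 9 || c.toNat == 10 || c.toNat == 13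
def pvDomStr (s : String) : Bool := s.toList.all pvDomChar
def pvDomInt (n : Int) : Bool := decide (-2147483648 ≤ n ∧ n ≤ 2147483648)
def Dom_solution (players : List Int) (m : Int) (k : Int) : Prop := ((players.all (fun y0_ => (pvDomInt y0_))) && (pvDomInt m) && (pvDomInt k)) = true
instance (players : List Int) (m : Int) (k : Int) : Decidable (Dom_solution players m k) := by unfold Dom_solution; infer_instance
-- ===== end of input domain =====

-- B replaces A's rescanned list of per-server expiry timestamps by a per-hour additions
-- ledger with a running live count, one O(1) subtraction per hour (a timing run
-- measured B faster on the generated inputs).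

-- ===== PORT A =====
-- inner loop: `for j in range(len(server)-1, -1, -1): if server[j] == i: server.pop(j)`
-- j counts down from len(server)-1; pop(j) is take j ++ drop (j+1); j is always in range during
-- execution (indices below j are untouched by pops at ≥ j), so the getD default 0 is never the result.
def solutionCheck (i : Int) : List Int → Nat → List Int
  | server, 0 => server
  | server, j + 1 =>
    solutionCheck i
      (if server.getD j 0 == i then server.take j ++ server.drop (j + 1) else server) j

-- outer loop: `for i in range(len(players)): nowplay = players[i]; …` rendered over enumerate(players)
def solutionLoop (m k : Int) : List (Int × Int) → Int × List Int → Int × List Int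
  | [], st => st
  | (i, nowplay) :: rest, (answer, server0) =>
    let server := solutionCheck i server0 server0.length
    if nowplay < (server.length : Int) * m then
      solutionLoop m k rest (answer, server)
    else
      let nw := PySem.Int.floordiv nowplay m + 1 - (server.length : Int)
      -- `for _ in range(new): server.append(i+k)`
      solutionLoop m k rest
        (answer + nw, (PySem.List.pyRange 0 nw 1).foldl (fun s _ => s ++ [i + k]) server)

def solution (players : List Int) (m : Int) (k : Int) : Int :=
  (solutionLoop m k (PySem.List.enumerate players 0) (0, [25])).1

-- ===== PORT B =====
-- one iteration of B's `for i, p in enumerate(players)` body; `adds[i - k]` is in range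
-- (0 ≤ i-k < len(adds) = i) whenever the guard holds, so getD's default is never returned
def solutionAltLoop (m k : Int) :
    List (Int × Int) → Int × Int × List Int → Int × Int × List Int
  | [], st => st
  | (i, p) :: rest, (answer, alive0, adds) =>
    let alive := if 0 < k ∧ k ≤ i then alive0 - adds.getD (i - k).toNat 0 else alive0
    let cnt := alive + (if i < 25 then (1 : Int) else 0)
    let step : Int × Int :=
      if p ≥ cnt * m then
        (answer + (PySem.Int.floordiv p m + 1 - cnt),
         max (PySem.Int.floordiv p m + 1 - cnt) 0)
      else (answer, 0)
    solutionAltLoop m k rest (step.1, alive + step.2, adds ++ [step.2])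

def solution_alt (players : List Int) (m : Int) (k : Int) : Int :=
  (solutionAltLoop m k (PySem.List.enumerate players 0) (0, 0, [])).1

-- ===== PRECONDITION & SPEC =====
-- Pre_ excludes exactly the inputs on which the Python A raises ZeroDivisionError
-- (m = 0 and some hourly count is ≥ 0, so the `//` line is reached); B raises there too.
def Pre_solution (players : List Int) (m : Int) (k : Int) : Prop :=
  m ≠ 0 ∨ ∀ p ∈ players, p < 0
instance (players : List Int) (m : Int) (k : Int) : Decidable (Pre_solution players m k) := by
  unfold Pre_solution; infer_instance

def pvWitness_solution : List Int × Int × Int := ([30, 0, 75, 40], 10, 2)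

def Spec_solution (players : List Int) (m : Int) (k : Int) (out : Int) : Prop := out = solution_alt players m k
instance (players : List Int) (m : Int) (k : Int) (out : Int) : Decidable (Spec_solution players m k out) := by unfold Spec_solution; infer_instance

-- ===== CLAIM (what is proved, stated in full; the proofs are below) =====
def Claim_equal_solution : Prop := ∀ (players : List Int) (m : Int) (k : Int), Dom_solution players m k → Pre_solution players m k → Spec_solution players m k (solution players m k)

-- ===== LEMMAS AND PROOFS =====

-- A's downward check loop removes exactly the elements equal to i.
lemma solutionCheck_eq (i : Int) :
    ∀ (j : Nat) (s : List Int), j ≤ s.length →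
      solutionCheck i s j = (s.take j).filter (fun x => !(x == i)) ++ s.drop j := by
  intro j
  induction j with
  | zero => intro s _; simp [solutionCheck]
  | succ j ih =>
    intro s hj
    have hjlt : j < s.length := by omega
    have hget : s.getD j 0 = s[j] := by
      simp [List.getD, List.getElem?_eq_getElem hjlt]
    rw [solutionCheck]
    simp only [hget, beq_iff_eq]
    by_cases hc : s[j] = i
    · rw [if_pos hc]
      have hlen : j ≤ (s.take j ++ s.drop (j + 1)).length := by
        simp [List.length_take, List.length_drop]; omega
      rw [ih _ hlen]
      have ht : (s.take j ++ s.drop (j + 1)).take j = s.take j := by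
        rw [List.take_append_of_le_length (by simp [List.length_take]; omega)]
        simp [List.take_take]
      have hd : (s.take j ++ s.drop (j + 1)).drop j = s.drop (j + 1) := by
        rw [List.drop_append_of_le_length (by simp [List.length_take]; omega)]
        simp
      rw [ht, hd]
      have htake : s.take (j + 1) = s.take j ++ [s[j]] := by
        rw [List.take_succ]; simp [List.getElem?_eq_getElem hjlt]
      rw [htake, List.filter_append]
      simp [hc]
    · rw [if_neg hc]
      rw [ih _ (le_of_lt hjlt)]
      have htake : s.take (j + 1) = s.take j ++ [s[j]] := by
        rw [List.take_succ]; simp [List.getElem?_eq_getElem hjlt]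
      have hdrop : s.drop j = s[j] :: s.drop (j + 1) := List.drop_eq_getElem_cons hjlt
      rw [htake, List.filter_append, hdrop]
      simp [hc]

lemma solutionCheck_filter (i : Int) (s : List Int) :
    solutionCheck i s s.length = s.filter (fun x => !(x == i)) := by
  have := solutionCheck_eq i s.length s le_rfl
  simpa using this

lemma length_filter_ne_int (i : Int) (s : List Int) :
    ((s.filter (fun x => !(x == i))).length : Int) = (s.length : Int) - s.count i := by
  induction s with
  | nil => simp
  | cons a t ih =>
    by_cases h : a = i
    · subst h; simp [ih]
    · simp [h, ih]; ring

lemma count_filter_ne (i t : Int) (s : List Int) :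
    (s.filter (fun x => !(x == i))).count t = if t = i then 0 else s.count t := by
  by_cases ht : t = i
  · subst ht
    rw [if_pos rfl, List.count_eq_zero]
    intro hmem
    have := (List.mem_filter.1 hmem).2
    simp at this
  · rw [if_neg ht]
    exact List.count_filter (by simp [ht])

-- `for _ in range(new): server.append(i+k)` appends (pyRange 0 nw 1).length copies of i+k
lemma append_loop (nw x : Int) (s : List Int) :
    (PySem.List.pyRange 0 nw 1).foldl (fun s _ => s ++ [x]) s
      = s ++ List.replicate (PySem.List.pyRange 0 nw 1).length x := by
  rw [show (fun (s : List Int) (_ : Int) => s ++ [x])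
        = (fun (s : List Int) (y : Int) => s ++ [(fun _ => x) y]) from rfl]
  rw [PySem.List.foldl_append_singleton_eq_map]
  simp [List.map_const']

lemma pyRange_len_int (nw : Int) :
    ((PySem.List.pyRange 0 nw 1).length : Int) = max nw 0 := by
  rw [PySem.List.length_pyRange_one]
  omega

-- last-element lookup in a snoc list
lemma getD_snoc (l : List Int) (g : Int) (n : Nat) :
    (l ++ [g]).getD n 0 = if n = l.length then g else l.getD n 0 := by
  by_cases h : n < l.length
  · rw [if_neg (by omega)]
    rw [List.getD_eq_getElem _ _ (by simp; omega), List.getD_eq_getElem _ _ h]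
    simp [List.getElem_append_left h]
  · by_cases he : n = l.length
    · subst he
      rw [if_pos rfl, List.getD_eq_getElem _ _ (by simp)]
      simp [List.getElem_append_right]
    · rw [if_neg he, List.getD_eq_default _ _ (by simp; omega),
          List.getD_eq_default _ _ (by omega)]

-- ledger invariant, one step: after A's scan at hour i and g' appends of expiry i+k,
-- the per-hour additions ledger extended by g' describes the new server multiset.
lemma led_step (k i g' alive : Int) (hg : 0 ≤ g') (server adds : List Int)
    (h0 : (adds.length : Int) = i)
    (h2 : ∀ t : Int, i < t → (server.count t : Int)
        = (if t = 25 then 1 else 0)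
          + (if 0 ≤ t - k ∧ t - k < i then adds.getD (t - k).toNat 0 else 0))
    (h3 : ((server.filter (fun x => !(x == i))).length : Int)
        = (if i < 25 then 1 else 0)
          + (if 0 < k ∧ k ≤ i then alive - adds.getD (i - k).toNat 0 else alive)) :
    (((adds ++ [g']).length : Int) = i + 1)
    ∧ (∀ t : Int, i + 1 < t →
        (((server.filter (fun x => !(x == i)) ++ List.replicate g'.toNat (i + k)).count t : Int)
          = (if t = 25 then 1 else 0)
            + (if 0 ≤ t - k ∧ t - k < i + 1 then (adds ++ [g']).getD (t - k).toNat 0 else 0)))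
    ∧ ((((server.filter (fun x => !(x == i)) ++ List.replicate g'.toNat (i + k)).filter
            (fun x => !(x == i + 1))).length : Int)
        = (if i + 1 < 25 then 1 else 0)
          + (if 0 < k ∧ k ≤ i + 1 then
               ((if 0 < k ∧ k ≤ i then alive - adds.getD (i - k).toNat 0 else alive) + g')
                 - (adds ++ [g']).getD (i + 1 - k).toNat 0
             else (if 0 < k ∧ k ≤ i then alive - adds.getD (i - k).toNat 0 else alive) + g')) := by
  have hi : 0 ≤ i := by omega
  have hrep : ∀ t : Int, ((List.replicate g'.toNat (i + k)).count t : Int)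
      = if t = i + k then g' else 0 := by
    intro t
    by_cases h : t = i + k
    · subst h; simp [Int.toNat_of_nonneg hg]
    · have h' : ¬ (i + k = t) := fun hh => h hh.symm
      simp [List.count_replicate, h, h']
  refine ⟨by simp only [List.length_append, List.length_cons, List.length_nil]; push_cast; omega,
    ?_, ?_⟩
  · -- counts of future hours
    intro t ht
    rw [List.count_append]
    push_cast
    have hcount : ((server.filter (fun x => !(x == i))).count t : Int)
        = (server.count t : Int) := by
      rw [count_filter_ne, if_neg (by omega)]
    rw [hcount, hrep, h2 t (by omega), getD_snoc]
    split_ifs <;> omega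
  · -- filtered length for the next hour
    rw [List.filter_append, List.length_append]
    push_cast
    have h1 : (((server.filter (fun x => !(x == i))).filter
          (fun x => !(x == i + 1))).length : Int)
        = ((server.filter (fun x => !(x == i))).length : Int)
          - ((server.filter (fun x => !(x == i))).count (i + 1)) :=
      length_filter_ne_int (i + 1) _
    have hcnt : (((server.filter (fun x => !(x == i))).count (i + 1)) : Int)
        = (if (i + 1 : Int) = 25 then 1 else 0)
          + (if 0 ≤ i + 1 - k ∧ i + 1 - k < i then adds.getD (i + 1 - k).toNat 0 else 0) := by
      rw [count_filter_ne, if_neg (by omega)]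
      exact h2 (i + 1) (by omega)
    have hrepf : (((List.replicate g'.toNat (i + k)).filter
          (fun x => !(x == i + 1))).length : Int)
        = if i + k = i + 1 then 0 else g' := by
      by_cases h : i + k = i + 1
      · rw [if_pos h, List.length_eq_zero_iff.2]
        · simp
        · rw [List.filter_eq_nil_iff]
          intro a ha
          have := List.eq_of_mem_replicate ha
          simp [this, h]
      · rw [if_neg h]
        have : (List.replicate g'.toNat (i + k)).filter (fun x => !(x == i + 1))
            = List.replicate g'.toNat (i + k) := by
          rw [List.filter_eq_self]
          intro a ha
          have := List.eq_of_mem_replicate ha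
          simp [this, h]
        rw [this]; simp [Int.toNat_of_nonneg hg]
    rw [h1, hcnt, h3, hrepf, getD_snoc]
    split_ifs <;> omega
-- main loop correspondence: A's server simulation equals B's additions ledger
lemma loop_eq_led (m k : Int) :
    ∀ (ps : List Int) (i ans alive : Int) (server adds : List Int),
      (adds.length : Int) = i →
      (∀ t : Int, i < t → (server.count t : Int)
          = (if t = 25 then 1 else 0)
            + (if 0 ≤ t - k ∧ t - k < i then adds.getD (t - k).toNat 0 else 0)) →
      (((server.filter (fun x => !(x == i))).length : Int)
          = (if i < 25 then 1 else 0)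
            + (if 0 < k ∧ k ≤ i then alive - adds.getD (i - k).toNat 0 else alive)) →
      (solutionLoop m k (PySem.List.enumerate ps i) (ans, server)).1
        = (solutionAltLoop m k (PySem.List.enumerate ps i) (ans, alive, adds)).1 := by
  intro ps
  induction ps with
  | nil => intro i ans alive server adds _ _ _; simp [PySem.List.enumerate_nil, solutionLoop, solutionAltLoop]
  | cons p rest ih =>
    intro i ans alive server adds h0 h2 h3
    rw [PySem.List.enumerate_cons, solutionLoop, solutionAltLoop]
    simp only
    rw [solutionCheck_filter]
    set alive1 := if 0 < k ∧ k ≤ i then alive - adds.getD (i - k).toNat 0 else alive with ha1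
    set server1 := server.filter (fun x => !(x == i)) with hs1
    have hcnt : (server1.length : Int) = alive1 + (if i < 25 then (1 : Int) else 0) := by
      rw [hs1, h3, ha1]; ring
    by_cases hcond : p < (server1.length : Int) * m
    · have hcond' : ¬ p ≥ (alive1 + (if i < 25 then (1 : Int) else 0)) * m := by
        rw [← hcnt]; omega
      rw [if_pos hcond, if_neg hcond']
      simp only
      have hstep := led_step k i 0 alive le_rfl server adds h0 h2 h3
      have hrep0 : server1 = server1 ++ List.replicate (0 : Int).toNat (i + k) := by simp
      rw [hrep0]
      exact ih (i + 1) ans (alive1 + 0) _ _ hstep.1 hstep.2.1 hstep.2.2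
    · have hcond' : p ≥ (alive1 + (if i < 25 then (1 : Int) else 0)) * m := by
        rw [← hcnt]; omega
      rw [if_neg hcond, if_pos hcond']
      simp only
      set nw := PySem.Int.floordiv p m + 1 - (server1.length : Int) with hnw
      have hnw' : PySem.Int.floordiv p m + 1 - (alive1 + (if i < 25 then (1 : Int) else 0)) = nw := by
        rw [hnw, hcnt]
      rw [append_loop, hnw']
      have hglen : (PySem.List.pyRange 0 nw 1).length = (max nw 0).toNat := by
        have := pyRange_len_int nw
        omega
      rw [hglen]
      have hstep := led_step k i (max nw 0) alive (le_max_right _ _) server adds h0 h2 h3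
      exact ih (i + 1) (ans + nw) (alive1 + max nw 0) _ _ hstep.1 hstep.2.1 hstep.2.2

-- ===== VERDICT (by name: the statement is the Claim_ definition above) =====
theorem solution_spec : Claim_equal_solution := by
  intro players m k _ _
  unfold Spec_solution solution solution_alt
  apply loop_eq_led m k players 0 0 0 [25] []
  · simp
  · intro t ht
    have hc : ¬ (0 ≤ t - k ∧ t - k < 0) := by omega
    rw [if_neg hc]
    by_cases h : t = 25
    · simp [h]
    · have h' : ¬ (25 : Int) = t := fun hh => h hh.symm
      simp [h, h']
  · simp
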